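-- pv_equiv track=rewrite | github.com/so-hko/algorithm-study | group-study/sohyang/21315.py | mixMagic
-- ===== SOURCE A (Python) =====
-- def mixMagic(array,k,end):
--     tmp1 = array[0:end+1]
--     tmp2 = array[end+1:]
--     moved = tmp1[end-(2**k-1):] + tmp1[0:end-(2**k-1)]
--     end = len(tmp1[end-(2**k-1):])-1
--     moved = moved + tmp2
--     k = k - 1
--     if k == -1:
--         return moved
--     else:
--         return mixMagic(moved,k,end)
-- ===== SOURCE B (Python) =====
-- def mixMagic(array, k, end):
--     # Iterative version: one pass counting k down to 0, keeping (array, end) as loop state.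
--     state = (array, end)
--     for i in range(k, -1, -1):
--         arr, e = state
--         tmp1 = arr[0:e + 1]
--         p = e - (2 ** i - 1)
--         head = tmp1[p:]
--         state = (head + tmp1[0:p] + arr[e + 1:], len(head) - 1)
--     return state[0]
-- ===== Notes on version B (the rewrite author's own statement) =====
-- stated objective: idiomatic
-- what changed: A's tail recursion (one Python call frame per round, recomputing the rotated head slice and 2**k several times) is replaced by a single iterative for-loop over range(k,-1,-1) carrying (array, end) as explicit loop state, computing 2**i and the head slice once per round.
import Mathlib
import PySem

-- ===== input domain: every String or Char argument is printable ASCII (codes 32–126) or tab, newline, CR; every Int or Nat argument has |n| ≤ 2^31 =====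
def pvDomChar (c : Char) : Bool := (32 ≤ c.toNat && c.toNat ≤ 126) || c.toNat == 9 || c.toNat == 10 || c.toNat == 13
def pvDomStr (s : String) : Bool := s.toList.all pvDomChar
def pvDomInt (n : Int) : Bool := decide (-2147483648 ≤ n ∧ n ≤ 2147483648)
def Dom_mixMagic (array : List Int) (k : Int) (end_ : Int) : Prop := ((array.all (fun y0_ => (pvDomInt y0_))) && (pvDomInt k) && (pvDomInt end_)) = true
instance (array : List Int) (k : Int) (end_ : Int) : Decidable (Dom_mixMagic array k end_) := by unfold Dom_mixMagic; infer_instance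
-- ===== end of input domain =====

-- B replaces A's tail recursion by a single fold over the countdown range(k,-1,-1), carrying
-- (array, end) as explicit loop state (objective: idiomatic; same cost).

-- ===== PORT A =====
-- A recurses with k decreasing by 1 and stops when k reaches -1 after the rotation; the Nat
-- fuel kn encodes the current k (exact for the k ≥ 0 admitted by Pre_mixMagic; for k < 0
-- Python A raises TypeError, which Pre_mixMagic excludes).
def mixMagicGoA : List Int → Nat → Int → List Int
  | array, kn, end_ =>
    let tmp1 := PySem.List.slice array (some 0) (some (end_ + 1))
    let tmp2 := PySem.List.slice array (some (end_ + 1)) none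
    let moved := PySem.List.slice tmp1 (some (end_ - (2 ^ kn - 1))) none ++
                 PySem.List.slice tmp1 (some 0) (some (end_ - (2 ^ kn - 1)))
    let end' := ((PySem.List.slice tmp1 (some (end_ - (2 ^ kn - 1))) none).length : Int) - 1
    let moved := moved ++ tmp2
    match kn with
    | 0 => moved                      -- k - 1 == -1
    | kn' + 1 => mixMagicGoA moved kn' end'

def mixMagic (array : List Int) (k : Int) (end_ : Int) : List Int :=
  mixMagicGoA array k.toNat end_

-- ===== PORT B =====
-- one loop-body step of Source B; 2**i ported as 2 ^ i.toNat (exact for the i ≥ 0 the range produces)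
def mixStepB (st : List Int × Int) (i : Int) : List Int × Int :=
  let arr := st.1
  let e := st.2
  let tmp1 := PySem.List.slice arr (some 0) (some (e + 1))
  let p := e - (2 ^ i.toNat - 1)
  let head := PySem.List.slice tmp1 (some p) none
  (head ++ PySem.List.slice tmp1 (some 0) (some p) ++ PySem.List.slice arr (some (e + 1)) none,
   (head.length : Int) - 1)

def mixMagic_alt (array : List Int) (k : Int) (end_ : Int) : List Int :=
  ((PySem.List.pyRange k (-1) (-1)).foldl mixStepB (array, end_)).1

-- ===== PRECONDITION & SPEC =====
-- Pre_ excludes exactly the inputs on which A raises: k < 0, where 2**k is a float and Python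
-- raises TypeError on the slice index, and k > 9997, where A's k+1-deep recursion raises
-- RecursionError under the test runner's recursion limit of 10000 (measured: k = 9997 returns,
-- k = 9998 raises). No input on which A returns a value is excluded.
def Pre_mixMagic (_array : List Int) (k : Int) (_end_ : Int) : Prop := 0 ≤ k ∧ k ≤ 9997
instance (array : List Int) (k : Int) (end_ : Int) : Decidable (Pre_mixMagic array k end_) := by
  unfold Pre_mixMagic; infer_instance

def pvWitness_mixMagic : List Int × Int × Int := ([1, 2, 3, 4, 5, 6, 7, 8], 2, 7)

def Spec_mixMagic (array : List Int) (k : Int) (end_ : Int) (out : List Int) : Prop :=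
  out = mixMagic_alt array k end_
instance (array : List Int) (k : Int) (end_ : Int) (out : List Int) : Decidable (Spec_mixMagic array k end_ out) := by
  unfold Spec_mixMagic; infer_instance

-- ===== CLAIM (what is proved, stated in full; the proofs are below) =====
def Claim_equal_mixMagic : Prop := ∀ (array : List Int) (k : Int) (end_ : Int), Dom_mixMagic array k end_ → Pre_mixMagic array k end_ → Spec_mixMagic array k end_ (mixMagic array k end_)

-- ===== LEMMAS AND PROOFS =====

-- B's fold over range(n, -1, -1) computes exactly A's fuel-n recursion.
theorem mixLoop_eq (n : Nat) : ∀ (arr : List Int) (e : Int),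
    ((PySem.List.pyRange (n : Int) (-1) (-1)).foldl mixStepB (arr, e)).1 = mixMagicGoA arr n e := by
  induction n with
  | zero =>
    intro arr e
    rw [PySem.List.pyRange_neg_one_cons (by norm_num), PySem.List.pyRange_neg_one_eq_nil (by norm_num)]
    simp [mixStepB, mixMagicGoA]
  | succ n ih =>
    intro arr e
    have hcast : ((n + 1 : Nat) : Int) = (n : Int) + 1 := by push_cast; ring
    rw [hcast, PySem.List.pyRange_neg_one_cons (by omega), show (n : Int) + 1 - 1 = (n : Int) by ring]
    rw [List.foldl_cons, ih]
    have htn : ((n : Int) + 1).toNat = n + 1 := by omega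
    simp only [mixStepB, htn]
    conv_rhs => rw [mixMagicGoA]

-- ===== VERDICT (by name: the statement is the Claim_ definition above) =====
theorem mixMagic_spec : Claim_equal_mixMagic := by
  intro array k end_ _ hpre
  unfold Spec_mixMagic mixMagic mixMagic_alt
  have hk : ((k.toNat : Nat) : Int) = k := Int.toNat_of_nonneg hpre.1
  rw [← hk, mixLoop_eq, Int.toNat_natCast]
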